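-- pv_equiv track=rewrite | github.com/shevdan/Algo-DataStructures-sem8 | sem4/task7.py | solve
-- ===== SOURCE A (Python) =====
-- from typing import List
--
-- class Heap:
--     def __init__(self, arr) -> None:
--         self.arr = arr
--         self.heap_size = len(self.arr)
--
--     def left(self,idx):
--         if idx == 0:
--             return 1
--         return 2*(idx + 1) - 1
--
--     def right(self, idx):
--         if idx == 0:
--             return 2
--         return 2* (idx + 1)
--
--     def parent(self, idx):
--         return (idx - 1) // 2
--
--     def buildMaxHeap(self):
--         for i in range(len(self.arr) // 2, -1, -1):
--             self.maxHeapify(i)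
--
--     def maxHeapify(self, idx):
--         left_son = self.left(idx)
--         right_son = self.right(idx)
--         if left_son < self.heap_size and self.arr[left_son].freq >= self.arr[idx].freq:
--             largest = left_son
--         else:
--             largest = idx
--         if right_son < self.heap_size and self.arr[right_son].freq >= self.arr[largest].freq:
--             largest = right_son
--         if largest != idx:
--             self.arr[idx], self.arr[largest] =  self.arr[largest], self.arr[idx]
--             self.maxHeapify(largest)
--
--     def extractMax(self):
--         if self.heap_size < 0:
--             raise IndexError("Empty heap")
--         max_val = self.arr[0]
--         self.arr[0], self.arr[self.heap_size - 1] = self.arr[self.heap_size - 1], self.arr[0]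
--
--         self.heap_size -= 1
--         self.maxHeapify(0)
--         return max_val
--
-- class FreqElm:
--     def __init__(self, data, freq=0) -> None:
--         self.data = data
--         self.freq = freq
--
-- def solve(arr: List[int]) -> int:
--     freq_table = {}
--     for elm in arr:
--         if elm in freq_table:  #O(n)
--             freq_table[elm] += 1
--         else:
--             freq_table[elm] = 1
--
--     freq_arr = []
--     for elm in freq_table:  #O(n)
--         freq_arr.append(FreqElm(elm, freq_table[elm]))
--
--     heap = Heap(freq_arr)
--     heap.buildMaxHeap() #o(n)
--     arr_length = len(arr)
--     new_arr_length = 0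
--     num_elm_to_delete = 0
--     while new_arr_length * 2 < arr_length:  #max O(n)
--         new_arr_length += heap.extractMax().freq    #O(lgn)
--         num_elm_to_delete += 1
--
--     return num_elm_to_delete       #O(nlogn)
-- ===== SOURCE B (Python) =====
-- def solve(arr):
--     n = len(arr)
--     freq = {}
--     for x in arr:
--         freq[x] = freq.get(x, 0) + 1
--     buckets = [0] * (n + 1)
--     for f in freq.values():
--         buckets[f] += 1
--     covered = 0
--     k = 0
--     for f in range(n, 0, -1):
--         for _ in range(buckets[f]):
--             if covered * 2 < n:
--                 covered += f
--                 k += 1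
--     return k
-- ===== Notes on version B (the rewrite author's own statement) =====
-- stated objective: faster
-- what changed: A counts frequencies, builds a hand-written binary max-heap of FreqElm objects and repeatedly extracts the maximum frequency until half the array is covered; B counts frequencies, tallies them into a bucket array indexed by frequency and sweeps the buckets from the highest frequency down, so no heap and no log-factor per extraction.
import Mathlib
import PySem

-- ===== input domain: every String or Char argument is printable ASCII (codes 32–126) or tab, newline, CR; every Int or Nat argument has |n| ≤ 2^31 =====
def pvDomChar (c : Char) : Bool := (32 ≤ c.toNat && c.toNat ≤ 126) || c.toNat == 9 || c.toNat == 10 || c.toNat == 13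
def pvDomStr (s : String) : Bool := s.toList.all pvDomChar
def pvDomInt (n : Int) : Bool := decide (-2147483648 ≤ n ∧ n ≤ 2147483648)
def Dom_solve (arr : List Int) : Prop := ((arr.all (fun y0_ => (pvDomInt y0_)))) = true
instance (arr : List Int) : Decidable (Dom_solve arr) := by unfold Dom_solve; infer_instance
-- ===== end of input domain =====

-- B replaces A's hand-written binary max-heap selection by a frequency bucket array
-- swept from the highest frequency down; the return values are proved equal.

-- ===== PORT A =====
-- FreqElm(data, freq) is ported as the pair (data, freq); `fr l i` reads l[i].freq
-- (a default pair stands in for Python's IndexError — every access A performs is in range).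
def frD : Int × Int := (0, 0)
def fr (l : List (Int × Int)) (i : Nat) : Int := (l.getD i frD).2
-- Heap.left / Heap.right (both branches of the Python `if idx == 0` kept)
def leftA (idx : Nat) : Nat := if idx = 0 then 1 else 2 * (idx + 1) - 1
def rightA (idx : Nat) : Nat := if idx = 0 then 2 else 2 * (idx + 1)
-- the simultaneous assignment arr[i], arr[j] = arr[j], arr[i]
def swapA (l : List (Int × Int)) (i j : Nat) : List (Int × Int) :=
  (l.set i (l.getD j frD)).set j (l.getD i frD)
-- the `largest` computed by Heap.maxHeapify (the two successive if-tests, same order;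
-- largestA1 is `largest` after the first if, largestA after the second)
def largestA1 (l : List (Int × Int)) (size idx : Nat) : Nat :=
  if leftA idx < size ∧ fr l idx ≤ fr l (leftA idx) then leftA idx else idx
def largestA (l : List (Int × Int)) (size idx : Nat) : Nat :=
  if rightA idx < size ∧ fr l (largestA1 l size idx) ≤ fr l (rightA idx) then rightA idx
  else largestA1 l size idx

theorem largestA_gt {l : List (Int × Int)} {size idx : Nat}
    (h : largestA l size idx ≠ idx) :
    idx < largestA l size idx ∧ largestA l size idx < size := by
  unfold largestA largestA1 at *
  simp only [leftA, rightA] at *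
  split_ifs at * <;> omega

-- Heap.maxHeapify; recursion measure: largest > idx and largest < size
def maxHeapify (l : List (Int × Int)) (size idx : Nat) : List (Int × Int) :=
  if _h : largestA l size idx ≠ idx then
    maxHeapify (swapA l idx (largestA l size idx)) size (largestA l size idx)
  else l
termination_by size - idx
decreasing_by
  have := largestA_gt _h; omega

-- Heap.buildMaxHeap: for i in range(len(arr)//2, -1, -1): maxHeapify(i)  (heap_size = len(arr))
def buildMaxHeapA (l : List (Int × Int)) : List (Int × Int) :=
  ((List.range (l.length / 2 + 1)).reverse).foldl (fun acc i => maxHeapify acc l.length i) l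

-- the `while new_arr_length * 2 < arr_length` loop; each iteration inlines extractMax
-- (read arr[0], swap arr[0] with arr[heap_size-1], heap_size -= 1, maxHeapify(0)).
-- `fuel` only makes the recursion structural: the Python loop runs at most heap-size
-- iterations (the popped frequencies sum to len(arr)), so fuel = size + 1 is never exhausted.
def loopA (n : Int) : Nat → List (Int × Int) → Nat → Int → Int → Int
  | 0, _, _, _, k => k
  | fuel + 1, l, size, newLen, k =>
    if newLen * 2 < n then
      loopA n fuel (maxHeapify (swapA l 0 (size - 1)) (size - 1) 0) (size - 1)
        (newLen + fr l 0) (k + 1)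
    else k

def solve (arr : List Int) : Int :=
  -- freq_table: for elm in arr: if elm in freq_table: += 1 else: = 1
  let freqTable := arr.foldl
    (fun d x => if (d.get? x).isSome then d.insert x (d.getD x 0 + 1) else d.insert x 1)
    PySem.Dict.empty
  -- freq_arr: for elm in freq_table: append FreqElm(elm, freq_table[elm])
  let freqArr := freqTable.keys.map (fun k => (k, freqTable.getD k 0))
  let heap := buildMaxHeapA freqArr
  loopA (PySem.List.len arr) (heap.length + 1) heap heap.length 0 0

-- ===== PORT B =====
def solve_alt (arr : List Int) : Int :=
  let n := PySem.List.len arr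
  -- freq[x] = freq.get(x, 0) + 1
  let freq := arr.foldl (fun d x => d.insert x (d.getD x 0 + 1)) PySem.Dict.empty
  -- buckets = [0] * (n + 1); buckets[f] += 1 for f in freq.values()
  let buckets := freq.values.foldl
    (fun b f => PySem.List.pySetD b f (PySem.List.pyGetD b f 0 + 1))
    (List.replicate (arr.length + 1) (0 : Int))
  -- for f in range(n, 0, -1): for _ in range(buckets[f]): if covered*2 < n: ...
  let st := (PySem.List.pyRange n 0 (-1)).foldl
    (fun (st : Int × Int) f =>
      (PySem.List.pyRange 0 (PySem.List.pyGetD buckets f 0) 1).foldl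
        (fun st _ => if st.1 * 2 < n then (st.1 + f, st.2 + 1) else st) st)
    (0, 0)
  st.2

-- ===== PRECONDITION & SPEC =====
def Spec_solve (arr : List Int) (out : Int) : Prop := out = solve_alt arr
instance (arr : List Int) (out : Int) : Decidable (Spec_solve arr out) := by
  unfold Spec_solve; infer_instance

-- ===== CLAIM (what is proved, stated in full; the proofs are below) =====
def Claim_equal_solve : Prop := ∀ (arr : List Int), Dom_solve arr → Spec_solve arr (solve arr)

-- ===== LEMMAS AND PROOFS =====

-- ---- binary-tree index combinatorics ----
def ChildOf (i j : Nat) : Prop := j = 2 * i + 1 ∨ j = 2 * i + 2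

inductive InSub (a : Nat) : Nat → Prop
  | base : InSub a a
  | left {i : Nat} : InSub a i → InSub a (2 * i + 1)
  | right {i : Nat} : InSub a i → InSub a (2 * i + 2)

theorem childOf_lt {i j : Nat} (h : ChildOf i j) : i < j := by
  rcases h with h | h <;> omega

theorem insub_le {a j : Nat} (h : InSub a j) : a ≤ j := by
  induction h with
  | base => exact Nat.le_refl a
  | left _ ih => omega
  | right _ ih => omega

theorem insub_child {a i j : Nat} (h : InSub a i) (hc : ChildOf i j) : InSub a j := by
  rcases hc with hc | hc <;> subst hc
  · exact InSub.left h
  · exact InSub.right h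

theorem insub_parent {a i j : Nat} (h : InSub a j) (hne : j ≠ a) (hc : ChildOf i j) :
    InSub a i := by
  induction h with
  | base => exact absurd rfl hne
  | @left i' h' _ =>
    rcases hc with hc | hc
    · have : i = i' := by omega
      subst this; exact h'
    · omega
  | @right i' h' _ =>
    rcases hc with hc | hc
    · omega
    · have : i = i' := by omega
      subst this; exact h'

theorem insub_trans {a b c : Nat} (h1 : InSub a b) (h2 : InSub b c) : InSub a c := by
  induction h2 with
  | base => exact h1
  | left _ ih => exact InSub.left ih
  | right _ ih => exact InSub.right ih

theorem insub_zero (j : Nat) : InSub 0 j := by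
  induction j using Nat.strong_induction_on with
  | _ j ih =>
    match j with
    | 0 => exact InSub.base
    | Nat.succ m =>
      rcases Nat.even_or_odd m with ⟨t, ht⟩ | ⟨t, ht⟩
      · have h1 : m.succ = 2 * t + 1 := by omega
        rw [h1]; exact InSub.left (ih t (by omega))
      · have h1 : m.succ = 2 * t + 2 := by omega
        rw [h1]; exact InSub.right (ih t (by omega))

theorem not_insub_of_lt {a j : Nat} (h : j < a) : ¬ InSub a j :=
  fun hs => absurd (insub_le hs) (by omega)

def IsHeap (l : List (Int × Int)) (size : Nat) : Prop :=
  ∀ i j, ChildOf i j → j < size → fr l j ≤ fr l i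

-- root of a dominated subtree bounds every node in it
theorem sub_bound {l : List (Int × Int)} {size a : Nat}
    (h : ∀ i j, InSub a i → ChildOf i j → j < size → fr l j ≤ fr l i) :
    ∀ p, InSub a p → p < size → fr l p ≤ fr l a := by
  intro p hp
  induction hp with
  | base => intro _; exact le_refl _
  | @left i hi ih =>
    intro hlt
    exact le_trans (h i _ hi (Or.inl rfl) hlt) (ih (by omega))
  | @right i hi ih =>
    intro hlt
    exact le_trans (h i _ hi (Or.inr rfl) hlt) (ih (by omega))

-- ---- swapA / fr basics ----
theorem fr_eq (l : List (Int × Int)) (p : Nat) : fr l p = ((l[p]?).getD frD).2 := by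
  simp [fr, List.getD_eq_getElem?_getD]

theorem length_swapA (l : List (Int × Int)) (i j : Nat) :
    (swapA l i j).length = l.length := by
  simp [swapA]

theorem getElem?_swapA (l : List (Int × Int)) (i j : Nat)
    (hi : i < l.length) (hj : j < l.length) (p : Nat) :
    (swapA l i j)[p]? = if p = j then some l[i] else if p = i then some l[j] else l[p]? := by
  unfold swapA
  rw [List.getD_eq_getElem l frD hj, List.getD_eq_getElem l frD hi]
  by_cases hpj : p = j
  · subst hpj
    simp [hj]
  · rw [List.getElem?_set]
    simp only [List.length_set]
    rw [if_neg (by omega : ¬ j = p)]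
    by_cases hpi : p = i
    · subst hpi
      simp [hi, hpj]
    · simp [hpj, hpi, Ne.symm hpi]

theorem fr_swapA (l : List (Int × Int)) (i j : Nat)
    (hi : i < l.length) (hj : j < l.length) (p : Nat) :
    fr (swapA l i j) p = if p = j then fr l i else if p = i then fr l j else fr l p := by
  rw [fr_eq, getElem?_swapA l i j hi hj]
  split_ifs <;> simp [fr_eq, hi, hj]

theorem swapA_perm (l : List (Int × Int)) (i j : Nat)
    (hi : i < l.length) (hj : j < l.length) :
    List.Perm (swapA l i j) l := by
  unfold swapA
  rw [List.getD_eq_getElem l frD hj, List.getD_eq_getElem l frD hi]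
  exact List.set_set_perm hi hj

-- ---- largestA facts ----
theorem leftA_eq (idx : Nat) : leftA idx = 2 * idx + 1 := by
  unfold leftA; split_ifs <;> omega

theorem rightA_eq (idx : Nat) : rightA idx = 2 * idx + 2 := by
  unfold rightA; split_ifs <;> omega

theorem childOf_iff (idx j : Nat) : ChildOf idx j ↔ (j = leftA idx ∨ j = rightA idx) := by
  simp [ChildOf, leftA_eq, rightA_eq]

theorem largestA_cases (l : List (Int × Int)) (size idx : Nat) :
    largestA l size idx = idx ∨ largestA l size idx = leftA idx ∨
      largestA l size idx = rightA idx := by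
  unfold largestA largestA1
  split_ifs <;> tauto

theorem largestA_ge_idx {l : List (Int × Int)} {size idx : Nat}
    (h : largestA l size idx ≠ idx) : fr l idx ≤ fr l (largestA l size idx) := by
  unfold largestA largestA1 at h ⊢
  by_cases h1 : leftA idx < size ∧ fr l idx ≤ fr l (leftA idx)
  · rw [if_pos h1] at h ⊢
    by_cases h2 : rightA idx < size ∧ fr l (leftA idx) ≤ fr l (rightA idx)
    · rw [if_pos h2]; exact le_trans h1.2 h2.2
    · rw [if_neg h2]; exact h1.2
  · rw [if_neg h1] at h ⊢
    by_cases h2 : rightA idx < size ∧ fr l idx ≤ fr l (rightA idx)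
    · rw [if_pos h2]; exact h2.2
    · rw [if_neg h2] at h; exact absurd rfl h

theorem largestA_ge_children {l : List (Int × Int)} {size idx : Nat}
    (h : largestA l size idx ≠ idx) :
    ∀ j, (j = leftA idx ∨ j = rightA idx) → j < size →
      fr l j ≤ fr l (largestA l size idx) := by
  unfold largestA largestA1 at h ⊢
  by_cases h1 : leftA idx < size ∧ fr l idx ≤ fr l (leftA idx)
  · rw [if_pos h1] at h ⊢
    by_cases h2 : rightA idx < size ∧ fr l (leftA idx) ≤ fr l (rightA idx)
    · rw [if_pos h2]
      rintro j (rfl | rfl) hj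
      · exact h2.2
      · exact le_refl _
    · rw [if_neg h2]
      rintro j (rfl | rfl) hj
      · exact le_refl _
      · push_neg at h2; exact le_of_lt (h2 hj)
  · rw [if_neg h1] at h ⊢
    by_cases h2 : rightA idx < size ∧ fr l idx ≤ fr l (rightA idx)
    · rw [if_pos h2]
      rintro j (rfl | rfl) hj
      · push_neg at h1; exact le_trans (le_of_lt (h1 hj)) h2.2
      · exact le_refl _
    · rw [if_neg h2] at h; exact absurd rfl h

theorem largestA_eq_idx_children {l : List (Int × Int)} {size idx : Nat}
    (h : largestA l size idx = idx) :
    ∀ j, (j = leftA idx ∨ j = rightA idx) → j < size → fr l j ≤ fr l idx := by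
  unfold largestA largestA1 at h
  have hl : leftA idx ≠ idx := by rw [leftA_eq]; omega
  have hr : rightA idx ≠ idx := by rw [rightA_eq]; omega
  by_cases h1 : leftA idx < size ∧ fr l idx ≤ fr l (leftA idx)
  · rw [if_pos h1] at h
    by_cases h2 : rightA idx < size ∧ fr l (leftA idx) ≤ fr l (rightA idx)
    · rw [if_pos h2] at h; exact absurd h hr
    · rw [if_neg h2] at h; exact absurd h hl
  · rw [if_neg h1] at h
    by_cases h2 : rightA idx < size ∧ fr l idx ≤ fr l (rightA idx)
    · rw [if_pos h2] at h; exact absurd h hr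
    · push_neg at h1 h2
      rintro j (rfl | rfl) hj
      · exact le_of_lt (h1 hj)
      · exact le_of_lt (h2 hj)

-- ---- maxHeapify master lemmas ----
theorem maxHeapify_perm : ∀ (l : List (Int × Int)) (size idx : Nat), size ≤ l.length →
    List.Perm (maxHeapify l size idx) l := by
  intro l size idx
  refine maxHeapify.induct size
    (fun l idx => size ≤ l.length → List.Perm (maxHeapify l size idx) l)
    (fun l idx h ih => ?_) (fun l idx h => ?_) l idx
  · intro hs
    obtain ⟨hgt, hsz⟩ := largestA_gt h
    rw [maxHeapify, dif_pos h]
    exact (ih (by rw [length_swapA]; exact hs)).trans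
      (swapA_perm l idx _ (by omega) (by omega))
  · intro _
    rw [maxHeapify, dif_neg h]

theorem maxHeapify_length (l : List (Int × Int)) (size idx : Nat) (hs : size ≤ l.length) :
    (maxHeapify l size idx).length = l.length :=
  (maxHeapify_perm l size idx hs).length_eq

theorem maxHeapify_frozen : ∀ (l : List (Int × Int)) (size idx : Nat), size ≤ l.length →
    ∀ (p : Nat), (¬ InSub idx p ∨ size ≤ p) →
    (maxHeapify l size idx)[p]? = l[p]? := by
  intro l size idx
  refine maxHeapify.induct size
    (fun l idx => size ≤ l.length → ∀ (p : Nat), (¬ InSub idx p ∨ size ≤ p) →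
      (maxHeapify l size idx)[p]? = l[p]?)
    (fun l idx h ih => ?_) (fun l idx h => ?_) l idx
  · intro hs p hp
    obtain ⟨hgt, hsz⟩ := largestA_gt h
    set lg := largestA l size idx with hlg
    have hclg : ChildOf idx lg := by
      rcases largestA_cases l size idx with hc | hc | hc
      · exact absurd hc h
      · exact (childOf_iff idx lg).2 (Or.inl hc)
      · exact (childOf_iff idx lg).2 (Or.inr hc)
    have hinlg : InSub idx lg := insub_child InSub.base hclg
    have hpidx : p ≠ idx := by
      rcases hp with hp | hp
      · exact fun he => hp (he ▸ InSub.base)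
      · omega
    have hplg : p ≠ lg := by
      rcases hp with hp | hp
      · exact fun he => hp (he ▸ hinlg)
      · omega
    have hp' : ¬ InSub lg p ∨ size ≤ p := by
      rcases hp with hp | hp
      · exact Or.inl (fun hq => hp (insub_trans hinlg hq))
      · exact Or.inr hp
    rw [maxHeapify, dif_pos h]
    rw [ih (by rw [length_swapA]; exact hs) p hp']
    rw [getElem?_swapA l idx lg (by omega) (by omega) p, if_neg hplg, if_neg hpidx]
  · intro _ p _
    rw [maxHeapify, dif_neg h]

theorem maxHeapify_bound (l : List (Int × Int)) (size idx : Nat) (B : Int)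
    (hs : size ≤ l.length) (hidx : idx < size)
    (hb : ∀ j, InSub idx j → j < size → fr l j ≤ B) :
    fr (maxHeapify l size idx) idx ≤ B := by
  rw [maxHeapify]
  by_cases h : largestA l size idx ≠ idx
  · rw [dif_pos h]
    obtain ⟨hgt, hsz⟩ := largestA_gt h
    set lg := largestA l size idx with hlg
    set s := swapA l idx lg with hsdef
    have hs' : size ≤ s.length := by rw [hsdef, length_swapA]; exact hs
    have hfroz := maxHeapify_frozen s size lg hs' idx (Or.inl (not_insub_of_lt hgt))
    have h1 : fr (maxHeapify s size lg) idx = fr s idx := by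
      rw [fr_eq, fr_eq, hfroz]
    rw [h1, hsdef, fr_swapA l idx lg (by omega) (by omega) idx,
      if_neg (by omega : ¬ idx = lg), if_pos rfl]
    have hclg : ChildOf idx lg := by
      rcases largestA_cases l size idx with hc | hc | hc
      · exact absurd hc h
      · exact (childOf_iff idx lg).2 (Or.inl hc)
      · exact (childOf_iff idx lg).2 (Or.inr hc)
    exact hb lg (insub_child InSub.base hclg) hsz
  · rw [dif_neg h]
    exact hb idx InSub.base hidx

theorem maxHeapify_heap : ∀ (l : List (Int × Int)) (size idx : Nat), size ≤ l.length →
    (∀ i j, InSub idx i → i ≠ idx → ChildOf i j → j < size → fr l j ≤ fr l i) →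
    ∀ i j, InSub idx i → ChildOf i j → j < size →
      fr (maxHeapify l size idx) j ≤ fr (maxHeapify l size idx) i := by
  intro l size idx
  refine maxHeapify.induct size
    (fun l idx => size ≤ l.length →
      (∀ i j, InSub idx i → i ≠ idx → ChildOf i j → j < size → fr l j ≤ fr l i) →
      ∀ i j, InSub idx i → ChildOf i j → j < size →
        fr (maxHeapify l size idx) j ≤ fr (maxHeapify l size idx) i)
    (fun l idx h ih => ?_) (fun l idx h => ?_) l idx
  swap
  · intro _ hAH i j hi hc hj
    rw [maxHeapify, dif_neg h]
    push_neg at h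
    by_cases hii : i = idx
    · subst hii
      exact largestA_eq_idx_children h j ((childOf_iff i j).1 hc) hj
    · exact hAH i j hi hii hc hj
  · intro hs hAH
    obtain ⟨hgt, hsz⟩ := largestA_gt h
    set lg := largestA l size idx with hlg
    have hclg : ChildOf idx lg := by
      rcases largestA_cases l size idx with hc | hc | hc
      · exact absurd hc h
      · exact (childOf_iff idx lg).2 (Or.inl hc)
      · exact (childOf_iff idx lg).2 (Or.inr hc)
    have hinlg : InSub idx lg := insub_child InSub.base hclg
    set s := swapA l idx lg with hsdef
    have hs' : size ≤ s.length := by rw [hsdef, length_swapA]; exact hs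
    have hfs : ∀ p, fr s p = if p = lg then fr l idx else if p = idx then fr l lg else fr l p := by
      intro p
      rw [hsdef]
      exact fr_swapA l idx lg (by omega) (by omega) p
    -- the shifted almost-heap hypothesis for the recursive call at lg
    have hAH' : ∀ i j, InSub lg i → i ≠ lg → ChildOf i j → j < size → fr s j ≤ fr s i := by
      intro i j hi hne hc hj
      have hilg : lg < i := lt_of_le_of_ne (insub_le hi) (Ne.symm hne)
      have hij : i < j := childOf_lt hc
      rw [hfs, hfs, if_neg (by omega : ¬ j = lg), if_neg (by omega : ¬ j = idx),
        if_neg (by omega : ¬ i = lg), if_neg (by omega : ¬ i = idx)]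
      exact hAH i j (insub_trans hinlg hi) (by omega) hc hj
    have IH := ih hs' hAH'
    rw [maxHeapify, dif_pos h]
    intro i j hi hc hj
    by_cases hiInLg : InSub lg i
    · exact IH i j hiInLg hc hj
    · have hfri : fr (maxHeapify s size lg) i = fr s i := by
        rw [fr_eq, fr_eq, maxHeapify_frozen s size lg hs' i (Or.inl hiInLg)]
      by_cases hjlg : j = lg
      · -- the edge from idx into lg after the swap
        subst hjlg
        have hiidx : i = idx := by
          rcases hc with hc | hc <;> rcases hclg with hd | hd <;> omega
        subst hiidx
        have hMi : fr (maxHeapify s size lg) i = fr l lg := by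
          rw [hfri, hfs, if_neg (by omega : ¬ i = lg), if_pos rfl]
        have hsubb : ∀ p, InSub lg p → p < size → fr l p ≤ fr l lg := by
          apply sub_bound
          intro a c ha hcc hcs
          have halg : lg ≤ a := insub_le ha
          exact hAH a c (insub_trans hinlg ha) (by omega) hcc hcs
        have hbnd : fr (maxHeapify s size lg) lg ≤ fr l lg := by
          apply maxHeapify_bound s size lg (fr l lg) hs' hsz
          intro p hp hps
          by_cases hplg : p = lg
          · subst hplg
            rw [hfs, if_pos rfl]
            exact largestA_ge_idx h
          · have : lg < p := lt_of_le_of_ne (insub_le hp) (Ne.symm hplg)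
            rw [hfs, if_neg hplg, if_neg (by omega : ¬ p = i)]
            exact hsubb p hp hps
        rw [hMi]
        exact hbnd
      · -- j stays outside the subtree of lg
        have hjIn : ¬ InSub lg j := fun hj' => hiInLg (insub_parent hj' hjlg hc)
        have hfrj : fr (maxHeapify s size lg) j = fr s j := by
          rw [fr_eq, fr_eq, maxHeapify_frozen s size lg hs' j (Or.inl hjIn)]
        rw [hfri, hfrj]
        have hilg2 : i ≠ lg := fun he => hiInLg (he ▸ InSub.base)
        have hij : i < j := childOf_lt hc
        have hidxle : idx ≤ i := insub_le hi
        by_cases hiidx : i = idx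
        · subst hiidx
          rw [hfs, hfs, if_neg hjlg, if_neg (by omega : ¬ j = i), if_neg hilg2, if_pos rfl]
          exact largestA_ge_children h j ((childOf_iff i j).1 hc) hj
        · rw [hfs, hfs, if_neg hjlg, if_neg (by omega : ¬ j = idx), if_neg hilg2,
            if_neg hiidx]
          exact hAH i j hi hiidx hc hj

-- ---- buildMaxHeap ----
theorem build_aux (n : Nat) :
    ∀ (i : Nat) (acc : List (Int × Int)), acc.length = n →
      (∀ p j, i ≤ p → ChildOf p j → j < n → fr acc j ≤ fr acc p) →
      IsHeap (((List.range i).reverse).foldl (fun a t => maxHeapify a n t) acc) n ∧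
        List.Perm (((List.range i).reverse).foldl (fun a t => maxHeapify a n t) acc) acc := by
  intro i
  induction i with
  | zero =>
    intro acc hlen hinv
    refine ⟨?_, List.Perm.refl _⟩
    intro p j hc hj
    exact hinv p j (Nat.zero_le p) hc hj
  | succ i ih =>
    intro acc hlen hinv
    have hrange : (List.range (i + 1)).reverse = i :: (List.range i).reverse := by
      rw [List.range_succ]; simp
    rw [hrange]
    simp only [List.foldl_cons]
    have hs : n ≤ acc.length := le_of_eq hlen.symm
    have hAH : ∀ p j, InSub i p → p ≠ i → ChildOf p j → j < n → fr acc j ≤ fr acc p := by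
      intro p j hp hne hc hj
      have : i ≤ p := insub_le hp
      exact hinv p j (by omega) hc hj
    have hheap := maxHeapify_heap acc n i hs hAH
    have hinv' : ∀ p j, i ≤ p → ChildOf p j → j < n →
        fr (maxHeapify acc n i) j ≤ fr (maxHeapify acc n i) p := by
      intro p j hp hc hj
      by_cases hpin : InSub i p
      · exact hheap p j hpin hc hj
      · have hpne : p ≠ i := fun he => hpin (he ▸ InSub.base)
        have hjne : j ≠ i := by
          intro he
          subst he
          exact absurd (childOf_lt hc) (by omega)
        have hjin : ¬ InSub i j := fun hj' => hpin (insub_parent hj' hjne hc)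
        have h1 : fr (maxHeapify acc n i) p = fr acc p := by
          rw [fr_eq, fr_eq, maxHeapify_frozen acc n i hs p (Or.inl hpin)]
        have h2 : fr (maxHeapify acc n i) j = fr acc j := by
          rw [fr_eq, fr_eq, maxHeapify_frozen acc n i hs j (Or.inl hjin)]
        rw [h1, h2]
        exact hinv p j (by omega) hc hj
    obtain ⟨hh, hp⟩ := ih (maxHeapify acc n i)
      (by rw [maxHeapify_length acc n i hs]; exact hlen) hinv'
    exact ⟨hh, hp.trans (maxHeapify_perm acc n i hs)⟩

theorem buildMaxHeapA_spec (l : List (Int × Int)) :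
    IsHeap (buildMaxHeapA l) l.length ∧ List.Perm (buildMaxHeapA l) l := by
  unfold buildMaxHeapA
  apply build_aux l.length (l.length / 2 + 1) l rfl
  intro p j hp hc hj
  exfalso
  rcases hc with hc | hc <;> omega

-- ---- the greedy specification ----
def gstep (n : Int) (st : Int × Int) (f : Int) : Int × Int :=
  if st.1 * 2 < n then (st.1 + f, st.2 + 1) else st

def greedy (n : Int) (fs : List Int) (st : Int × Int) : Int × Int := fs.foldl (gstep n) st

theorem greedy_frozen (n : Int) (fs : List Int) (st : Int × Int) (h : ¬ st.1 * 2 < n) :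
    greedy n fs st = st := by
  induction fs with
  | nil => rfl
  | cons f fs ih => simpa [greedy, gstep, h] using ih

-- ---- prefix multisets through pops ----
theorem take_perm_of_perm_frozen (r l : List (Int × Int)) (size : Nat)
    (hperm : List.Perm r l) (hfr : ∀ p, size ≤ p → r[p]? = l[p]?) :
    List.Perm (r.take size) (l.take size) := by
  have hdrop : r.drop size = l.drop size := by
    apply List.ext_getElem?
    intro n
    rw [List.getElem?_drop, List.getElem?_drop]
    exact hfr (size + n) (by omega)
  have h2 : List.Perm (r.take size ++ r.drop size) (l.take size ++ l.drop size) := by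
    simpa [List.take_append_drop] using hperm
  rw [hdrop] at h2
  exact (List.perm_append_right_iff _).mp h2

theorem take_set_ge {α : Type} (l : List α) (n i : Nat) (a : α) (h : n ≤ i) :
    (l.set i a).take n = l.take n := by
  apply List.ext_getElem?
  intro m
  rw [List.getElem?_take, List.getElem?_take]
  split_ifs with hm
  · rw [List.getElem?_set, if_neg (by omega : ¬ i = m)]
  · rfl

theorem take_set_lt {α : Type} : ∀ (l : List α) (n i : Nat) (a : α), i < n →
    (l.set i a).take n = (l.take n).set i a := by
  intro l
  induction l with
  | nil => intro n i a _; simp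
  | cons x l ih =>
    intro n i a h
    cases n with
    | zero => omega
    | succ n =>
      cases i with
      | zero => simp
      | succ i =>
        simp only [List.set_cons_succ, List.take_succ_cons]
        rw [ih n i a (by omega)]

theorem pop_step (l : List (Int × Int)) (size : Nat) (h1 : 0 < size) (hs : size ≤ l.length) :
    List.Perm (((swapA l 0 (size - 1)).take (size - 1)).map Prod.snd ++ [fr l 0])
      ((l.take size).map Prod.snd) := by
  obtain ⟨s, rfl⟩ : ∃ s, size = s + 1 := ⟨size - 1, by omega⟩
  simp only [Nat.add_sub_cancel]
  have h0 : 0 < l.length := by omega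
  have hsl : s < l.length := by omega
  have hfr0 : fr l 0 = l[0].2 := by
    rw [fr_eq, List.getElem?_eq_getElem h0]; rfl
  have htake : l.take (s + 1) = l.take s ++ [l[s]] := by
    rw [List.take_succ, List.getElem?_eq_getElem hsl]
    rfl
  have hswap : (swapA l 0 s).take s = (l.take s).set 0 l[s] := by
    unfold swapA
    rw [List.getD_eq_getElem l frD hsl, List.getD_eq_getElem l frD h0]
    by_cases hz : s = 0
    · subst hz; simp
    · rw [take_set_ge _ _ _ _ (le_refl s), take_set_lt _ _ _ _ (by omega)]
  rw [htake, hswap, hfr0]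
  by_cases hz : s = 0
  · subst hz
    simp
  · have hlt : 0 < (l.take s).length := by
      rw [List.length_take]; omega
    obtain ⟨b, t', ht⟩ := List.exists_cons_of_ne_nil (List.ne_nil_of_length_pos hlt)
    have h01 : (l.take s)[0]? = some l[0] := by
      rw [List.getElem?_take, if_pos (by omega : 0 < s), List.getElem?_eq_getElem h0]
    have h02 : (l.take s)[0]? = some b := by rw [ht]; rfl
    have hb : b = l[0] := by
      rw [h01] at h02
      exact (Option.some_inj.mp h02).symm
    rw [ht, hb]
    simp only [List.set_cons_zero, List.map_cons, List.map_append, List.map_nil,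
      List.cons_append]
    refine List.Perm.trans (List.Perm.cons _ (List.perm_append_singleton _ _)) ?_
    refine List.Perm.trans (List.Perm.swap _ _ _) ?_
    exact List.Perm.cons _ (List.perm_append_singleton _ _).symm

-- ---- the extraction loop follows the greedy on any sorted-descending enumeration ----
theorem loopA_eq_greedy (n : Int) (hn : 0 ≤ n) :
    ∀ (fuel : Nat) (fs : List Int) (l : List (Int × Int)) (size : Nat) (newLen k : Int),
      size ≤ fuel → size ≤ l.length → List.Pairwise (· ≥ ·) fs →
      List.Perm fs ((l.take size).map Prod.snd) → IsHeap l size →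
      newLen + fs.sum = n →
      loopA n fuel l size newLen k = (greedy n fs (newLen, k)).2 := by
  intro fuel
  induction fuel with
  | zero =>
    intro fs l size newLen k hfuel hsl hsort hperm hheap hsum
    have hsz : size = 0 := by omega
    subst hsz
    have h0 : fs.length = 0 := by simpa using hperm.length_eq
    have hnil : fs = [] := List.eq_nil_of_length_eq_zero h0
    subst hnil
    rfl
  | succ fuel ih =>
    intro fs l size newLen k hfuel hsl hsort hperm hheap hsum
    show loopA n (fuel + 1) l size newLen k = _
    rw [loopA]
    by_cases hc : newLen * 2 < n
    · rw [if_pos hc]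
      match fs, hsort, hperm, hsum with
      | [], _, _, hsum =>
        exfalso
        simp at hsum
        omega
      | m :: fs', hsort, hperm, hsum =>
        have hlenfs : fs'.length + 1 = size := by
          have := hperm.length_eq
          simp [List.length_take] at this
          omega
        have hszpos : 0 < size := by omega
        have h0 : 0 < l.length := by omega
        -- the heap root equals the head of the sorted enumeration
        have hge : ∀ x ∈ m :: fs', x ≤ m := by
          intro x hx
          rcases List.mem_cons.mp hx with rfl | hx
          · exact le_refl x
          · exact (List.pairwise_cons.mp hsort).1 x hx
        have h0t : (l.take size)[0]? = some l[0] := by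
          rw [List.getElem?_take, if_pos hszpos, List.getElem?_eq_getElem h0]
        have hrootmem : fr l 0 ∈ (l.take size).map Prod.snd := by
          rw [fr_eq, List.getElem?_eq_getElem h0]
          exact List.mem_map_of_mem (List.mem_of_getElem? h0t)
        have hroot_le : fr l 0 ≤ m := hge _ (hperm.mem_iff.mpr hrootmem)
        have hm_le : m ≤ fr l 0 := by
          have hmmem : m ∈ (l.take size).map Prod.snd :=
            hperm.mem_iff.mp (List.mem_cons_self)
          obtain ⟨p, hpmem, hpsnd⟩ := List.mem_map.mp hmmem
          obtain ⟨jj, hjj, hjeq⟩ := List.mem_iff_getElem.mp hpmem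
          have hjlen : jj < size := by
            rw [List.length_take] at hjj; omega
          have hjl : jj < l.length := by omega
          have hjq : (l.take size)[jj]? = some p := by
            rw [List.getElem?_eq_getElem hjj, hjeq]
          rw [List.getElem?_take, if_pos hjlen] at hjq
          have hfrj : fr l jj = m := by
            rw [fr_eq, hjq]
            exact hpsnd
          have := sub_bound (l := l) (size := size) (a := 0)
            (fun i j hi hc hj => hheap i j hc hj) jj (insub_zero jj) hjlen
          omega
        have hm : fr l 0 = m := le_antisymm hroot_le hm_le
        set s1 := swapA l 0 (size - 1) with hs1
        set l2 := maxHeapify s1 (size - 1) 0 with hl2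
        have hs1len : s1.length = l.length := length_swapA l 0 (size - 1)
        have hs1s : size - 1 ≤ s1.length := by omega
        have hl2len : l2.length = l.length := by
          rw [hl2, maxHeapify_length s1 (size - 1) 0 hs1s, hs1len]
        -- prefix multiset after the pop
        have hpop := pop_step l size hszpos hsl
        rw [hm] at hpop
        have hperm' : List.Perm fs' ((s1.take (size - 1)).map Prod.snd) := by
          have h2 : List.Perm ((s1.take (size - 1)).map Prod.snd ++ [m]) (m :: fs') :=
            hpop.trans hperm.symm
          have h3 : List.Perm (m :: (s1.take (size - 1)).map Prod.snd) (m :: fs') :=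
            (List.perm_append_singleton _ _).symm.trans h2
          exact (h3.cons_inv).symm
        have hperm2 : List.Perm fs' ((l2.take (size - 1)).map Prod.snd) := by
          have hfz : ∀ p, size - 1 ≤ p → l2[p]? = s1[p]? := by
            intro p hp
            exact maxHeapify_frozen s1 (size - 1) 0 hs1s p (Or.inr hp)
          have := take_perm_of_perm_frozen l2 s1 (size - 1)
            (maxHeapify_perm s1 (size - 1) 0 hs1s) hfz
          exact hperm'.trans (this.map Prod.snd).symm
        -- heap property after the pop
        have hheap2 : IsHeap l2 (size - 1) := by
          have hAH : ∀ i j, InSub 0 i → i ≠ 0 → ChildOf i j → j < size - 1 →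
              fr s1 j ≤ fr s1 i := by
            intro i j _ hne hc hj
            have hij : i < j := childOf_lt hc
            rw [hs1, fr_swapA l 0 (size - 1) h0 (by omega) j,
              fr_swapA l 0 (size - 1) h0 (by omega) i,
              if_neg (by omega : ¬ j = size - 1), if_neg (by omega : ¬ j = 0),
              if_neg (by omega : ¬ i = size - 1), if_neg hne]
            exact hheap i j hc (by omega)
          intro i j hc hj
          exact maxHeapify_heap s1 (size - 1) 0 hs1s hAH i j (insub_zero i) hc hj
        have hsum' : (newLen + m) + fs'.sum = n := by
          simp at hsum; omega
        rw [hm]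
        rw [ih fs' l2 (size - 1) (newLen + m) (k + 1) (by omega) (by omega)
          (List.pairwise_cons.mp hsort).2 hperm2 hheap2 hsum']
        simp [greedy, gstep, hc]
    · rw [if_neg hc, greedy_frozen n fs (newLen, k) hc]

-- ---- counter facts ----
theorem dictA_eq (arr : List Int) :
    arr.foldl
      (fun d x => if (d.get? x).isSome then d.insert x (d.getD x 0 + 1) else d.insert x 1)
      PySem.Dict.empty = PySem.Dict.counter arr := by
  have hbody : (fun (d : PySem.Dict Int Int) x =>
      if (d.get? x).isSome then d.insert x (d.getD x 0 + 1) else d.insert x 1)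
      = (fun d x => d.insert x (d.getD x 0 + 1)) := by
    funext d x
    by_cases h : (d.get? x).isSome
    · rw [if_pos h]
    · rw [if_neg h]
      have hnone : d.get? x = none := by
        cases hx : d.get? x
        · rfl
        · rw [hx] at h; simp at h
      rw [PySem.Dict.getD_eq_get?_getD, hnone]
      rfl
  rw [hbody]
  exact PySem.Dict.foldl_insert_getD_add_one_eq_counter arr

theorem set_ofList_perm_dedup (arr : List Int) :
    List.Perm (PySem.Set.ofList arr) arr.dedup := by
  rw [List.perm_ext_iff_of_nodup (PySem.Set.nodup_ofList arr) (List.nodup_dedup arr)]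
  intro x
  rw [PySem.Set.mem_ofList, List.mem_dedup]

theorem vals_sum (arr : List Int) :
    ((PySem.Dict.counter arr).values).sum = (arr.length : Int) := by
  rw [PySem.Dict.values_eq_map_keys _ (PySem.Dict.nodup_keys_counter arr) 0]
  have h1 : ((PySem.Dict.counter arr).keys.map
      (fun k => (PySem.Dict.counter arr).getD k 0))
      = (PySem.Dict.counter arr).keys.map (fun k => (arr.count k : Int)) := by
    apply List.map_congr_left
    intro k _
    rw [PySem.Dict.getD_counter]
  rw [h1, PySem.Dict.keys_counter]
  rw [((set_ofList_perm_dedup arr).map (fun k => (arr.count k : Int))).sum_eq]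
  have hcast : ∀ L : List Int, (L.map fun k => ((arr.count k : Nat) : Int)).sum
      = (((L.map fun k => arr.count k).sum : Nat) : Int) := by
    intro L
    induction L with
    | nil => simp
    | cons a L ih => simp [ih]
  rw [hcast, List.sum_map_count_dedup_eq_length]

theorem vals_mem (arr : List Int) :
    ∀ v ∈ (PySem.Dict.counter arr).values, 1 ≤ v ∧ v ≤ (arr.length : Int) := by
  rw [PySem.Dict.values_eq_map_keys _ (PySem.Dict.nodup_keys_counter arr) 0]
  intro v hv
  obtain ⟨k, hk, rfl⟩ := List.mem_map.mp hv
  rw [PySem.Dict.getD_counter]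
  rw [PySem.Dict.keys_counter, PySem.Set.mem_ofList] at hk
  have h1 : 0 < arr.count k := List.count_pos_iff.mpr hk
  have h2 : arr.count k ≤ arr.length := List.count_le_length
  omega

-- ---- the descending enumeration of frequencies ----
theorem mem_pyRange_neg_iff (n f : Int) (hn : 0 ≤ n) :
    f ∈ PySem.List.pyRange n 0 (-1) ↔ 1 ≤ f ∧ f ≤ n := by
  rw [PySem.List.pyRange_neg_one]
  simp only [List.mem_map, List.mem_range]
  constructor
  · rintro ⟨k, hk, rfl⟩
    omega
  · rintro ⟨h1, h2⟩
    exact ⟨(n - f).toNat, by omega, by omega⟩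

theorem pyRange_neg_pairwise (n : Int) :
    List.Pairwise (· > ·) (PySem.List.pyRange n 0 (-1)) := by
  rw [PySem.List.pyRange_neg_one]
  rw [List.pairwise_map]
  exact (List.pairwise_lt_range).imp (fun h => by omega)

theorem pyRange_neg_nodup (n : Int) : (PySem.List.pyRange n 0 (-1)).Nodup :=
  (pyRange_neg_pairwise n).imp (fun h => by omega)

theorem flat_perm : ∀ (R vs : List Int), R.Nodup → (∀ v ∈ vs, v ∈ R) →
    List.Perm (R.flatMap (fun f => List.replicate (vs.count f) f)) vs := by
  intro R
  induction R with
  | nil =>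
    intro vs _ hmem
    match vs with
    | [] => exact List.Perm.refl _
    | v :: vs => exact absurd (hmem v List.mem_cons_self) (List.not_mem_nil)
  | cons f R ih =>
    intro vs hnd hmem
    rw [List.flatMap_cons]
    have hnd' : R.Nodup := (List.nodup_cons.mp hnd).2
    have hfR : f ∉ R := (List.nodup_cons.mp hnd).1
    set vs2 := vs.filter (fun x => !(x == f)) with hvs2
    have hcnt : ∀ f' ∈ R, vs.count f' = vs2.count f' := by
      intro f' hf'
      have hne : f' ≠ f := fun he => hfR (he ▸ hf')
      rw [hvs2]
      exact (List.count_filter (by simp [hne])).symm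
    have hflatEq : R.flatMap (fun f' => List.replicate (vs.count f') f')
        = R.flatMap (fun f' => List.replicate (vs2.count f') f') := by
      rw [List.flatMap_def, List.flatMap_def]
      congr 1
      apply List.map_congr_left
      intro f' hf'
      rw [hcnt f' hf']
    have hmem2 : ∀ v ∈ vs2, v ∈ R := by
      intro v hv
      rw [hvs2, List.mem_filter] at hv
      have hvin := hmem v hv.1
      have hvne : v ≠ f := by simpa using hv.2
      rcases List.mem_cons.mp hvin with rfl | hvr
      · exact absurd rfl hvne
      · exact hvr
    have hih := ih vs2 hnd' hmem2
    rw [hflatEq]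
    have hrep : List.replicate (vs.count f) f = vs.filter (· == f) :=
      (List.filter_beq (l := vs) f).symm
    rw [hrep]
    exact ((List.Perm.refl _).append hih).trans (List.filter_append_perm _ vs)

theorem flat_sorted (R : List Int) (c : Int → Nat) (h : List.Pairwise (· > ·) R) :
    List.Pairwise (· ≥ ·) (R.flatMap (fun f => List.replicate (c f) f)) := by
  induction R with
  | nil => exact List.Pairwise.nil
  | cons f R ih =>
    rw [List.flatMap_cons]
    obtain ⟨hf, hR⟩ := List.pairwise_cons.mp h
    rw [List.pairwise_append]
    refine ⟨List.pairwise_replicate.mpr (Or.inr (le_refl f)), ih hR, ?_⟩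
    intro x hx y hy
    have hxf : x = f := List.eq_of_mem_replicate hx
    obtain ⟨f', hf', hy'⟩ := List.mem_flatMap.mp hy
    have hyf : y = f' := List.eq_of_mem_replicate hy'
    subst hxf; subst hyf
    exact le_of_lt (hf _ hf')

-- ---- B-side fold reshaping ----
theorem foldl_flatMap {α β γ : Type} (g : γ → β → γ) (h : α → List β) (R : List α) (init : γ) :
    (R.flatMap h).foldl g init = R.foldl (fun st f => (h f).foldl g st) init := by
  induction R generalizing init with
  | nil => rfl
  | cons f R ih => simp [List.flatMap_cons, List.foldl_append, ih]

theorem foldl_ignore {α : Type} (g : Int × Int → Int × Int) :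
    ∀ (L : List α) (st : Int × Int), L.foldl (fun st _ => g st) st = g^[L.length] st := by
  intro L
  induction L with
  | nil => intro st; rfl
  | cons x L ih =>
    intro st
    rw [List.foldl_cons, ih, List.length_cons, Function.iterate_succ_apply]

theorem replicate_foldl_iterate (n f : Int) :
    ∀ (m : Nat) (st : Int × Int),
      (List.replicate m f).foldl (gstep n) st = (fun st => gstep n st f)^[m] st := by
  intro m
  induction m with
  | zero => intro st; rfl
  | succ m ih =>
    intro st
    rw [List.replicate_succ, List.foldl_cons, ih, Function.iterate_succ_apply]

theorem foldl_const_range (n f : Int) (m : Nat) (st : Int × Int) :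
    (PySem.List.pyRange 0 (m : Int) 1).foldl (fun st (_ : Int) => gstep n st f) st
      = (List.replicate m f).foldl (gstep n) st := by
  rw [foldl_ignore (fun st => gstep n st f) _ st, replicate_foldl_iterate]
  have hlen : (PySem.List.pyRange 0 (m : Int) 1).length = m := by
    rw [PySem.List.length_pyRange_one]
    omega
  rw [hlen]

theorem bucket_char (vs : List Int) :
    ∀ (b : List Int), (∀ v ∈ vs, 0 ≤ v ∧ v.toNat < b.length) →
      ∀ (f : Int), 0 ≤ f → f.toNat < b.length →
      PySem.List.pyGetD
        (vs.foldl (fun b f => PySem.List.pySetD b f (PySem.List.pyGetD b f 0 + 1)) b) f 0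
        = PySem.List.pyGetD b f 0 + (vs.count f : Int) := by
  induction vs with
  | nil =>
    intro b _ f _ _
    simp
  | cons v vs ih =>
    intro b hb f hf hflen
    obtain ⟨hv0, hvlen⟩ := hb v List.mem_cons_self
    rw [List.foldl_cons]
    set b' := PySem.List.pySetD b v (PySem.List.pyGetD b v 0 + 1) with hb'
    have hblen : b'.length = b.length := PySem.List.length_pySetD _ _ _
    have hb2 : ∀ w ∈ vs, 0 ≤ w ∧ w.toNat < b'.length := by
      intro w hw
      rw [hblen]
      exact hb w (List.mem_cons_of_mem v hw)
    rw [ih b' hb2 f hf (by omega)]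
    have hget : PySem.List.pyGetD b' f 0
        = if v = f then PySem.List.pyGetD b f 0 + 1 else PySem.List.pyGetD b f 0 := by
      rw [hb', PySem.List.pySetD_of_nonneg b _ hv0]
      rw [PySem.List.pyGetD_eq_getElem _ 0 hf (by rw [List.length_set]; omega)]
      rw [List.getElem_set]
      by_cases hvf : v = f
      · rw [if_pos (by omega : v.toNat = f.toNat), if_pos hvf]
        subst hvf
        rfl
      · rw [if_neg (by omega : ¬ v.toNat = f.toNat), if_neg hvf,
          PySem.List.pyGetD_eq_getElem b 0 hf (by omega)]
    rw [hget, List.count_cons]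
    by_cases hvf : v = f
    · rw [if_pos hvf]
      simp [hvf]
      omega
    · rw [if_neg hvf]
      simp [hvf]

-- ---- assembly ----
theorem solve_alt_eq_greedy (arr : List Int) :
    solve_alt arr = (greedy (arr.length : Int)
      ((PySem.List.pyRange (arr.length : Int) 0 (-1)).flatMap
        (fun f => List.replicate (((PySem.Dict.counter arr).values).count f) f))
      (0, 0)).2 := by
  unfold solve_alt
  simp only [PySem.List.len_eq]
  rw [PySem.Dict.foldl_insert_getD_add_one_eq_counter]
  set vals := (PySem.Dict.counter arr).values with hvals
  set buckets := vals.foldl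
    (fun b f => PySem.List.pySetD b f (PySem.List.pyGetD b f 0 + 1))
    (List.replicate (arr.length + 1) (0 : Int)) with hbuckets
  have hbval : ∀ f : Int, 1 ≤ f → f ≤ (arr.length : Int) →
      PySem.List.pyGetD buckets f 0 = (vals.count f : Int) := by
    intro f h1 h2
    have hmemv : ∀ v ∈ vals, 0 ≤ v ∧
        v.toNat < (List.replicate (arr.length + 1) (0 : Int)).length := by
      intro v hv
      have := vals_mem arr v hv
      rw [List.length_replicate]
      omega
    rw [hbuckets, bucket_char vals _ hmemv f (by omega)
      (by rw [List.length_replicate]; omega)]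
    have hz : PySem.List.pyGetD (List.replicate (arr.length + 1) (0 : Int)) f 0 = 0 := by
      rw [PySem.List.pyGetD_eq_getElem _ 0 (by omega)
        (by rw [List.length_replicate]; omega)]
      simp
    rw [hz]
    omega
  have houter : (PySem.List.pyRange (arr.length : Int) 0 (-1)).foldl
      (fun (st : Int × Int) f =>
        (PySem.List.pyRange 0 (PySem.List.pyGetD buckets f 0) 1).foldl
          (fun st _ => if st.1 * 2 < (arr.length : Int) then (st.1 + f, st.2 + 1) else st) st)
      (0, 0)
      = (PySem.List.pyRange (arr.length : Int) 0 (-1)).foldl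
        (fun st f => (List.replicate (vals.count f) f).foldl (gstep (arr.length : Int)) st)
        (0, 0) := by
    apply PySem.List.foldl_congr_mem
    intro st f hf
    have hfm := (mem_pyRange_neg_iff (arr.length : Int) f (by omega)).mp hf
    rw [hbval f hfm.1 hfm.2]
    exact foldl_const_range (arr.length : Int) f (vals.count f) st
  refine congrArg Prod.snd (houter.trans ?_)
  simp only [greedy]
  rw [foldl_flatMap]

theorem solve_eq_greedy (arr : List Int) :
    solve arr = (greedy (arr.length : Int)
      ((PySem.List.pyRange (arr.length : Int) 0 (-1)).flatMap
        (fun f => List.replicate (((PySem.Dict.counter arr).values).count f) f))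
      (0, 0)).2 := by
  unfold solve
  simp only [PySem.List.len_eq]
  rw [dictA_eq]
  set d := PySem.Dict.counter arr with hd
  have hitems : d.keys.map (fun k => (k, d.getD k 0)) = d.items :=
    (PySem.Dict.items_eq_map_keys d (PySem.Dict.nodup_keys_counter arr) 0).symm
  rw [hitems]
  set H := buildMaxHeapA d.items with hH
  obtain ⟨hheap, hperm⟩ := buildMaxHeapA_spec d.items
  have hHlen : H.length = d.items.length := hperm.length_eq
  set fs := (PySem.List.pyRange (arr.length : Int) 0 (-1)).flatMap
    (fun f => List.replicate ((d.values).count f) f) with hfs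
  have hvalsperm : List.Perm fs d.values := by
    apply flat_perm _ _ (pyRange_neg_nodup (arr.length : Int))
    intro v hv
    rw [mem_pyRange_neg_iff (arr.length : Int) v (by omega)]
    exact vals_mem arr v hv
  have hvals_eq : d.values = d.items.map Prod.snd := rfl
  refine loopA_eq_greedy (arr.length : Int) (by omega) (H.length + 1) fs H H.length 0 0
    (by omega) (le_refl _) ?_ ?_ ?_ ?_
  · exact flat_sorted _ _ (pyRange_neg_pairwise (arr.length : Int))
  · rw [List.take_length]
    exact hvalsperm.trans (hvals_eq ▸ (hperm.map Prod.snd).symm)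
  · rw [hHlen]; exact hheap
  · rw [hvalsperm.sum_eq]
    have hv := vals_sum arr
    rw [← hd] at hv
    omega

theorem solve_eq (arr : List Int) : solve arr = solve_alt arr := by
  rw [solve_eq_greedy, solve_alt_eq_greedy]

-- ===== VERDICT (by name: the statement is the Claim_ definition above) =====
theorem solve_spec : Claim_equal_solve := by
  intro arr _
  unfold Spec_solve
  exact solve_eq arr
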